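-- pv_equiv track=rewrite | github.com/GitMonsters/octotetrahedral-agi | arc-puzzle-catalog/re-arc/solves/4a2008f0/solver.py | transform
-- ===== SOURCE A (Python) =====
-- from collections import Counter
--
-- def dominant_color(grid):
--     return Counter(cell for row in grid for cell in row).most_common(1)[0][0]
--
-- def trace_bouncing_diagonal(out, row, col, color):
--     height = len(out)
--     width = len(out[0])
--
--     horizontal_major = width >= height
--
--     if horizontal_major:
--         dcol = 1 if col == 0 else -1 if col == width - 1 else 1
--         drow = 1 if row == 0 else -1 if row == height - 1 else 1
--         while 0 <= col < width:
--             out[row][col] = color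
--             next_col = col + dcol
--             if not 0 <= next_col < width:
--                 break
--             next_row = row + drow
--             if next_row < 0 or next_row >= height:
--                 drow = -drow
--                 next_row = row + drow
--             row, col = next_row, next_col
--         return
--
--     drow = 1 if row == 0 else -1 if row == height - 1 else 1
--     dcol = 1 if col == 0 else -1 if col == width - 1 else 1
--     while 0 <= row < height:
--         out[row][col] = color
--         next_row = row + drow
--         if not 0 <= next_row < height:
--             break
--         next_col = col + dcol
--         if next_col < 0 or next_col >= width:
--             dcol = -dcol
--             next_col = col + dcol
--         row, col = next_row, next_col
--
-- def transform(grid):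
--     background = dominant_color(grid)
--     sources = [
--         (row_index, col_index, value)
--         for row_index, row in enumerate(grid)
--         for col_index, value in enumerate(row)
--         if value != background
--     ]
--     if not sources:
--         return [row[:] for row in grid]
--
--     out = [[background for _ in row] for row in grid]
--     for row, col, color in sources:
--         trace_bouncing_diagonal(out, row, col, color)
--     return out
-- ===== SOURCE B (Python) =====
-- from collections import Counter
--
-- def _fold(p, size):
--     if size == 1:
--         return 0
--     m = p % (2 * (size - 1))
--     return m if m < size else 2 * (size - 1) - m
--
-- def transform(grid):
--     background = Counter(cell for row in grid for cell in row).most_common(1)[0][0]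
--     sources = [
--         (r, c, v)
--         for r, row in enumerate(grid)
--         for c, v in enumerate(row)
--         if v != background
--     ]
--     if not sources:
--         return [row[:] for row in grid]
--     height = len(grid)
--     width = len(grid[0])
--     out = [[background] * width for _ in range(height)]
--     for r0, c0, color in sources:
--         if width >= height:
--             dc = -1 if c0 == width - 1 else 1
--             d0 = -1 if r0 == height - 1 else 1
--             steps = width if dc == -1 else width - c0
--             for k in range(steps):
--                 out[_fold(r0 + d0 * k, height)][c0 + dc * k] = color
--         else:
--             dr = -1 if r0 == height - 1 else 1
--             d0 = -1 if c0 == width - 1 else 1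
--             steps = height if dr == -1 else height - r0
--             for k in range(steps):
--                 out[r0 + dr * k][_fold(c0 + d0 * k, width)] = color
--     return out
-- ===== Notes on version B (the rewrite author's own statement) =====
-- stated objective: alternative
-- what changed: trace_bouncing_diagonal's stateful bounce simulation (maintained minor direction that is reversed at the grid edges each step) is replaced by a closed-form triangle-wave reflection: for each major step k the minor coordinate is computed directly as a fold of start+dir0*k into [0,size) modulo 2*(size-1), so no direction state is carried between steps.
-- outside the precondition, e.g. on transform([[1, 2], [1]]): A returns [[1, 2], [2]], B returns [[1, 2], [2, 1]]
import Mathlib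
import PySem

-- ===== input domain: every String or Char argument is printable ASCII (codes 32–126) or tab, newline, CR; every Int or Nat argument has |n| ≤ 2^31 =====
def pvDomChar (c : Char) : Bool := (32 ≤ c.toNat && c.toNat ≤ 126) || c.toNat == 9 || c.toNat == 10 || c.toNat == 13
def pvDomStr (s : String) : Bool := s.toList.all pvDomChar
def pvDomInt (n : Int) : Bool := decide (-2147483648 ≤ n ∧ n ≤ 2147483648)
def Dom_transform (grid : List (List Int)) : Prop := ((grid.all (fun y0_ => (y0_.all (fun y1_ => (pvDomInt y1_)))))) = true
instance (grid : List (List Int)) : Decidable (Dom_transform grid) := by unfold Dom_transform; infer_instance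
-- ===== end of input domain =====

-- B replaces A's step-by-step bounce simulation of each diagonal by a closed-form
-- triangle-wave reflection of the minor coordinate (objective: alternative algorithm, no state).

-- ===== PORT A =====
-- helpers shared by both ports: both Python files contain the identical code for
-- "out[row][col] = color", the Counter-based dominant colour and the source comprehension.
def pvSetCell (out : List (List Int)) (r c v : Int) : List (List Int) :=
  PySem.List.pySetD out r (PySem.List.pySetD (PySem.List.pyGetD out r []) c v)

-- Counter(cell for row in grid for cell in row).most_common(1)[0][0]
-- (most_common(1) picks the FIRST key attaining the maximal count = PySem.List.max?;
--  the none case is Python's IndexError on an empty grid, excluded by Pre_)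
def pvBackground (grid : List (List Int)) : Int :=
  match PySem.List.max? (PySem.Dict.counter (grid.flatMap id)).items (fun p => p.2) with
  | some p => p.1
  | none => 0

def pvSources (grid : List (List Int)) (bg : Int) : List (Int × Int × Int) :=
  (PySem.List.enumerate grid 0).flatMap (fun p =>
    ((PySem.List.enumerate p.2 0).filter (fun q => q.2 != bg)).map (fun q => (p.1, q.1, q.2)))

-- the horizontal-major while loop of trace_bouncing_diagonal (fuel = width+1 bounds the ≤ width iterations)
def traceH : Nat → List (List Int) → Int → Int → Int → Int → Int → Int → Int → List (List Int)
  | 0, out, _, _, _, _, _, _, _ => out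
  | fuel+1, out, row, col, drow, dcol, color, h, w =>
    if 0 ≤ col ∧ col < w then
      let out' := pvSetCell out row col color
      let nc := col + dcol
      if 0 ≤ nc ∧ nc < w then
        let nr := row + drow
        if nr < 0 ∨ h ≤ nr then
          traceH fuel out' (row - drow) nc (-drow) dcol color h w
        else
          traceH fuel out' nr nc drow dcol color h w
      else out'
    else out

-- the vertical-major while loop
def traceV : Nat → List (List Int) → Int → Int → Int → Int → Int → Int → Int → List (List Int)
  | 0, out, _, _, _, _, _, _, _ => out
  | fuel+1, out, row, col, drow, dcol, color, h, w =>
    if 0 ≤ row ∧ row < h then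
      let out' := pvSetCell out row col color
      let nr := row + drow
      if 0 ≤ nr ∧ nr < h then
        let nc := col + dcol
        if nc < 0 ∨ w ≤ nc then
          traceV fuel out' nr (col - dcol) drow (-dcol) color h w
        else
          traceV fuel out' nr nc drow dcol color h w
      else out'
    else out

def traceBD (out : List (List Int)) (row col color : Int) : List (List Int) :=
  let h : Int := out.length
  let w : Int := (PySem.List.pyGetD out 0 []).length
  if w ≥ h then
    let dcol : Int := if col = 0 then 1 else if col = w - 1 then -1 else 1
    let drow : Int := if row = 0 then 1 else if row = h - 1 then -1 else 1
    traceH (w.toNat + 1) out row col drow dcol color h w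
  else
    let drow : Int := if row = 0 then 1 else if row = h - 1 then -1 else 1
    let dcol : Int := if col = 0 then 1 else if col = w - 1 then -1 else 1
    traceV (h.toNat + 1) out row col drow dcol color h w

def transform (grid : List (List Int)) : List (List Int) :=
  let background := pvBackground grid
  let sources := pvSources grid background
  if sources = [] then grid.map (fun row => row)   -- [row[:] for row in grid]
  else
    let out := grid.map (fun row => row.map (fun _ => background))
    sources.foldl (fun out s => traceBD out s.1 s.2.1 s.2.2) out

-- ===== PORT B =====
-- triangle-wave reflection of p into [0, size)
def pvFold (p size : Int) : Int :=
  if size = 1 then 0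
  else
    let m := PySem.Int.mod p (2 * (size - 1))
    if m < size then m else 2 * (size - 1) - m

def transform_alt (grid : List (List Int)) : List (List Int) :=
  let background := pvBackground grid
  let sources := pvSources grid background
  if sources = [] then grid.map (fun row => row)   -- [row[:] for row in grid]
  else
    let h : Int := grid.length
    let w : Int := (PySem.List.pyGetD grid 0 []).length
    let out := (PySem.List.pyRange 0 h 1).map (fun _ => PySem.List.pyRepeat [background] w)
    sources.foldl (fun out s =>
      let r0 := s.1; let c0 := s.2.1; let color := s.2.2
      if w ≥ h then
        let dc : Int := if c0 = w - 1 then -1 else 1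
        let d0 : Int := if r0 = h - 1 then -1 else 1
        let steps : Int := if dc = -1 then w else w - c0
        (PySem.List.pyRange 0 steps 1).foldl
          (fun out k => pvSetCell out (pvFold (r0 + d0 * k) h) (c0 + dc * k) color) out
      else
        let dr : Int := if r0 = h - 1 then -1 else 1
        let d0 : Int := if c0 = w - 1 then -1 else 1
        let steps : Int := if dr = -1 then h else h - r0
        (PySem.List.pyRange 0 steps 1).foldl
          (fun out k => pvSetCell out (r0 + dr * k) (pvFold (c0 + d0 * k) w) color) out
      ) out

-- ===== PRECONDITION & SPEC =====
-- Pre_ excludes grids with no cells (A's most_common raises IndexError) and ragged grids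
-- with a non-dominant cell, where A's mix of the row-0 width with per-row lengths raises
-- IndexError or yields shapes that are an accident of A's in-place writes; all-equal
-- (sourceless) grids are kept even when ragged.
def Pre_transform (grid : List (List Int)) : Prop :=
  (grid ≠ [] ∧ (grid.headD []).length ≠ 0 ∧ ∀ row ∈ grid, row.length = (grid.headD []).length)
  ∨ (grid.flatten ≠ [] ∧ ∀ x ∈ grid.flatten, x = grid.flatten.headD 0)
instance (grid : List (List Int)) : Decidable (Pre_transform grid) := by
  unfold Pre_transform; infer_instance
def pvWitness_transform : List (List Int) := [[1, 2], [3, 1]]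
def Spec_transform (grid : List (List Int)) (out : List (List Int)) : Prop := out = transform_alt grid
instance (grid : List (List Int)) (out : List (List Int)) : Decidable (Spec_transform grid out) := by
  unfold Spec_transform; infer_instance

-- ===== CLAIM (what is proved, stated in full; the proofs are below) =====
def Claim_equal_transform : Prop := ∀ (grid : List (List Int)), Dom_transform grid → Pre_transform grid → Spec_transform grid (transform grid)

-- ===== LEMMAS AND PROOFS =====

-- the effective per-step move of the reflected minor coordinate
def pvE (s d0 p : Int) : Int := pvFold (p + d0) s - pvFold p s

-- invariant tying A's (minor, direction) state at unreflected position p to the triangle wave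
def MInv (s d0 p m d : Int) : Prop :=
  (s = 1 ∧ ((m = 0 ∧ d = 1) ∨ (m = -1 ∧ d = -1)))
  ∨ (2 ≤ s ∧ m = pvFold p s ∧
      (d = pvE s d0 p ∨ ((m + d < 0 ∨ s ≤ m + d) ∧ d = -pvE s d0 p)))

def Shape (out : List (List Int)) (H W : Nat) : Prop :=
  out.length = H ∧ ∀ row ∈ out, row.length = W

theorem emod_succ (p M : Int) (hM : 2 ≤ M) :
    (p + 1) % M = if p % M = M - 1 then 0 else p % M + 1 := by
  have hb : 0 ≤ p % M ∧ p % M < M := ⟨Int.emod_nonneg p (by omega), Int.emod_lt_of_pos p (by omega)⟩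
  have h1m : (1:Int) % M = 1 := Int.emod_eq_of_lt (by norm_num) (by omega)
  have h1 : (p + 1) % M = (p % M + 1) % M := by
    rw [Int.add_emod, h1m]
  rw [h1]
  split_ifs with h
  · rw [h]; simp
  · exact Int.emod_eq_of_lt (by omega) (by omega)

theorem emod_pred (p M : Int) (hM : 2 ≤ M) :
    (p - 1) % M = if p % M = 0 then M - 1 else p % M - 1 := by
  have hb : 0 ≤ p % M ∧ p % M < M := ⟨Int.emod_nonneg p (by omega), Int.emod_lt_of_pos p (by omega)⟩
  have h1m : (1:Int) % M = 1 := Int.emod_eq_of_lt (by norm_num) (by omega)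
  have h1 : (p - 1) % M = (p % M - 1) % M := by
    rw [Int.sub_emod, h1m]
  rw [h1]
  split_ifs with h
  · rw [h]
    have h2 : (-1 : Int) % M = (M - 1) % M := by
      conv_lhs => rw [show (-1 : Int) = (M - 1) + M * (-1) by ring]
      rw [Int.add_mul_emod_self_left]
    have h3 : (M - 1) % M = M - 1 := Int.emod_eq_of_lt (by omega) (by omega)
    rw [show (0 - 1 : Int) = -1 by ring, h2, h3]
  · exact Int.emod_eq_of_lt (by omega) (by omega)

theorem pvFold_emod (p s : Int) (hs : 2 ≤ s) :
    pvFold p s = (if p % (2*(s-1)) < s then p % (2*(s-1)) else 2*(s-1) - p % (2*(s-1))) := by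
  unfold pvFold
  rw [if_neg (by omega), PySem.Int.mod_eq_emod_of_pos (by omega)]

theorem pvFold_bounds (s p : Int) (hs : 2 ≤ s) : 0 ≤ pvFold p s ∧ pvFold p s < s := by
  have hM : (2:Int) ≤ 2*(s-1) := by omega
  have hb : 0 ≤ p % (2*(s-1)) ∧ p % (2*(s-1)) < 2*(s-1) :=
    ⟨Int.emod_nonneg p (by omega), Int.emod_lt_of_pos p (by omega)⟩
  rw [pvFold_emod p s hs]; split_ifs with h <;> omega

theorem pvFold_id (s r : Int) (hs : 2 ≤ s) (hr : 0 ≤ r ∧ r < s) : pvFold r s = r := by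
  have h1 : r % (2*(s-1)) = r := Int.emod_eq_of_lt (by omega) (by omega)
  rw [pvFold_emod r s hs, h1, if_pos (by omega)]

theorem pvE_pm_one (s d0 p : Int) (hs : 2 ≤ s) (hd0 : d0 = 1 ∨ d0 = -1) :
    pvE s d0 p = 1 ∨ pvE s d0 p = -1 := by
  have hM : (2:Int) ≤ 2*(s-1) := by omega
  have hb : 0 ≤ p % (2*(s-1)) ∧ p % (2*(s-1)) < 2*(s-1) :=
    ⟨Int.emod_nonneg p (by omega), Int.emod_lt_of_pos p (by omega)⟩
  unfold pvE
  rcases hd0 with h | h <;> subst h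
  · rw [pvFold_emod _ s hs, pvFold_emod p s hs, emod_succ p _ hM]
    split_ifs <;> omega
  · rw [pvFold_emod _ s hs, pvFold_emod p s hs, show p + -1 = p - 1 by ring, emod_pred p _ hM]
    split_ifs <;> omega

theorem pvE_next (s d0 p : Int) (hs : 2 ≤ s) (hd0 : d0 = 1 ∨ d0 = -1) :
    pvE s d0 (p + d0) = pvE s d0 p ∨
      ((pvFold (p + d0) s + pvE s d0 p < 0 ∨ s ≤ pvFold (p + d0) s + pvE s d0 p) ∧
        pvE s d0 (p + d0) = -pvE s d0 p) := by
  have hM : (2:Int) ≤ 2*(s-1) := by omega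
  have hb : 0 ≤ p % (2*(s-1)) ∧ p % (2*(s-1)) < 2*(s-1) :=
    ⟨Int.emod_nonneg p (by omega), Int.emod_lt_of_pos p (by omega)⟩
  unfold pvE
  rcases hd0 with h | h <;> subst h
  · rw [pvFold_emod (p+1+1) s hs, pvFold_emod (p+1) s hs, pvFold_emod p s hs,
      emod_succ (p+1) _ hM, emod_succ p _ hM]
    split_ifs <;> omega
  · rw [show p + -1 + -1 = (p - 1) - 1 by ring, show p + -1 = p - 1 by ring,
      pvFold_emod ((p-1)-1) s hs, pvFold_emod (p-1) s hs, pvFold_emod p s hs,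
      emod_pred (p-1) _ hM, emod_pred p _ hM]
    split_ifs <;> omega

theorem minv_step (s d0 p m d : Int) (hs : 1 ≤ s) (hd0 : d0 = 1 ∨ d0 = -1)
    (hinv : MInv s d0 p m d) :
    MInv s d0 (p + d0) (if m + d < 0 ∨ s ≤ m + d then m - d else m + d)
      (if m + d < 0 ∨ s ≤ m + d then -d else d) := by
  rcases hinv with ⟨hs1, hc⟩ | ⟨hs2, hm, hd⟩
  · subst hs1
    rcases hc with ⟨hm, hd⟩ | ⟨hm, hd⟩ <;> subst hm <;> subst hd <;>
      simp only [MInv] <;> norm_num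
  · have hfold := pvFold_bounds s p hs2
    have hfold' := pvFold_bounds s (p + d0) hs2
    have he := pvE_pm_one s d0 p hs2 hd0
    have hnext := pvE_next s d0 p hs2 hd0
    have hsum : pvFold p s + pvE s d0 p = pvFold (p + d0) s := by unfold pvE; ring
    have hgoal : MInv s d0 (p + d0) (pvFold (p + d0) s) (pvE s d0 p) := by
      right
      refine ⟨hs2, rfl, ?_⟩
      rcases hnext with h | ⟨hout, h⟩
      · left; omega
      · right; exact ⟨hout, by omega⟩
    rcases hd with hd | ⟨hout, hd⟩
    · rw [if_neg (by omega), if_neg (by omega)]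
      subst hd; rw [hm, hsum]; exact hgoal
    · rw [if_pos (by omega), if_pos (by omega)]
      have h1 : m - d = pvFold (p + d0) s := by omega
      have h2 : -d = pvE s d0 p := by omega
      rw [h1, h2]; exact hgoal

theorem shape_setCell (out : List (List Int)) (H W : Nat) (r c v : Int)
    (h : Shape out H W) : Shape (pvSetCell out r c v) H W := by
  obtain ⟨hl, hrows⟩ := h
  show Shape (PySem.List.pySetD out r (PySem.List.pySetD (PySem.List.pyGetD out r []) c v)) H W
  generalize hnrdef : PySem.List.pySetD (PySem.List.pyGetD out r []) c v = nr
  unfold PySem.List.pySetD PySem.List.pySet?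
  cases hidx : PySem.List.pyIdx? out.length r with
  | none =>
    simp only [Option.map_none, Option.getD_none]
    exact ⟨hl, hrows⟩
  | some k =>
    have hk : k < out.length := by
      revert hidx; unfold PySem.List.pyIdx?
      split_ifs <;> intro hh <;> simp_all <;> omega
    simp only [Option.map_some, Option.getD_some]
    refine ⟨by simpa using hl, ?_⟩
    intro row hrow
    rcases List.mem_or_eq_of_mem_set hrow with h1 | h1
    · exact hrows _ h1
    · subst h1
      have hget : PySem.List.pyGetD out r [] = out[k] := by
        unfold PySem.List.pyGetD PySem.List.pyGet?
        rw [hidx]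
        simp [List.getElem?_eq_getElem hk]
      rw [← hnrdef, PySem.List.length_pySetD, hget]
      exact hrows _ (List.getElem_mem hk)

theorem pvSetCell_idx_congr (out : List (List Int)) (r r' c v : Int)
    (h : PySem.List.pyIdx? out.length r = PySem.List.pyIdx? out.length r') :
    pvSetCell out r c v = pvSetCell out r' c v := by
  unfold pvSetCell PySem.List.pySetD PySem.List.pySet? PySem.List.pyGetD PySem.List.pyGet?
  rw [h]

theorem setCell_minv (out : List (List Int)) (H W : Nat) (hsh : Shape out H W)
    (d0 p m d c v : Int) (hinv : MInv (H : Int) d0 p m d) :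
    pvSetCell out m c v = pvSetCell out (pvFold p (H : Int)) c v := by
  rcases hinv with ⟨hs1, hc⟩ | ⟨hs2, hm, _⟩
  · have hH1 : H = 1 := by exact_mod_cast hs1
    have hf : pvFold p (H : Int) = 0 := by rw [hs1]; simp [pvFold]
    rcases hc with ⟨hm, _⟩ | ⟨hm, _⟩
    · rw [hm, hf]
    · rw [hm, hf]
      apply pvSetCell_idx_congr
      rw [hsh.1, hH1]
      unfold PySem.List.pyIdx?
      norm_num
  · rw [hm]

theorem setCell_minv_col (out : List (List Int)) (H W : Nat) (hsh : Shape out H W)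
    (d0 p m d r v : Int) (hr : 0 ≤ r ∧ r < (H : Int)) (hinv : MInv (W : Int) d0 p m d) :
    pvSetCell out r m v = pvSetCell out r (pvFold p (W : Int)) v := by
  have hrmem : PySem.List.pyGetD out r [] ∈ out :=
    PySem.List.pyGetD_mem out [] (by unfold PySem.Raise.InRange; rw [hsh.1]; omega)
  have hrlen : (PySem.List.pyGetD out r []).length = W := hsh.2 _ hrmem
  rcases hinv with ⟨hs1, hc⟩ | ⟨hs2, hm, _⟩
  · have hf : pvFold p (W : Int) = 0 := by rw [hs1]; simp [pvFold]
    rcases hc with ⟨hm, _⟩ | ⟨hm, _⟩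
    · rw [hm, hf]
    · rw [hm, hf]
      have hinner : PySem.List.pySetD (PySem.List.pyGetD out r []) (-1) v
          = PySem.List.pySetD (PySem.List.pyGetD out r []) 0 v := by
        have hW1 : W = 1 := by exact_mod_cast hs1
        unfold PySem.List.pySetD PySem.List.pySet?
        rw [hrlen, hW1, show PySem.List.pyIdx? 1 (-1) = PySem.List.pyIdx? 1 0 from by decide]
      unfold pvSetCell
      rw [hinner]
  · rw [hm]

theorem shape_foldl {H W : Nat} (f : List (List Int) → Int → List (List Int))
    (hf : ∀ o k, Shape o H W → Shape (f o k) H W) :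
    ∀ (l : List Int) (out : List (List Int)), Shape out H W → Shape (l.foldl f out) H W := by
  intro l
  induction l with
  | nil => intro out h; exact h
  | cons x t ih => intro out h; exact ih _ (hf _ _ h)

theorem traceH_eq (H W : Nat) (hH : 1 ≤ H) (d0 dc : Int)
    (hd0 : d0 = 1 ∨ d0 = -1) (r0 c0 steps color : Int)
    (hcol : ∀ k : Int, 0 ≤ k → k < steps → 0 ≤ c0 + dc * k ∧ c0 + dc * k < (W : Int))
    (hend : ¬(0 ≤ c0 + dc * steps ∧ c0 + dc * steps < (W : Int))) :
    ∀ (fuel : Nat) (j : Int) (out : List (List Int)) (m d : Int), Shape out H W →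
      0 ≤ j → j < steps → MInv (H : Int) d0 (r0 + d0 * j) m d →
      (steps - j).toNat ≤ fuel →
      traceH fuel out m (c0 + dc * j) d dc color (H : Int) (W : Int)
        = (PySem.List.pyRange j steps 1).foldl
            (fun o k => pvSetCell o (pvFold (r0 + d0 * k) (H : Int)) (c0 + dc * k) color) out := by
  intro fuel
  induction fuel with
  | zero =>
    intro j out m d hsh hj0 hjs hinv hfuel
    exact absurd hfuel (by omega)
  | succ fuel ih =>
    intro j out m d hsh hj0 hjs hinv hfuel
    have hcolj := hcol j hj0 hjs
    have hw : pvSetCell out m (c0 + dc * j) color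
        = pvSetCell out (pvFold (r0 + d0 * j) (H : Int)) (c0 + dc * j) color :=
      setCell_minv out H W hsh d0 _ m d _ color hinv
    have hsh' : Shape (pvSetCell out m (c0 + dc * j) color) H W := shape_setCell _ _ _ _ _ _ hsh
    rw [PySem.List.pyRange_one_cons hjs, List.foldl_cons, ← hw]
    simp only [traceH]
    rw [if_pos hcolj]
    have hcc : c0 + dc * j + dc = c0 + dc * (j + 1) := by ring
    by_cases hnext : j + 1 < steps
    · have hcolj1 := hcol (j + 1) (by omega) hnext
      rw [if_pos (by rw [hcc]; exact hcolj1)]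
      have hstep := minv_step (H : Int) d0 (r0 + d0 * j) m d (by exact_mod_cast hH) hd0 hinv
      have hp1 : r0 + d0 * j + d0 = r0 + d0 * (j + 1) := by ring
      rw [hp1] at hstep
      by_cases hout : m + d < 0 ∨ (H : Int) ≤ m + d
      · simp only [if_pos hout] at hstep
        rw [if_pos hout, hcc]
        have := ih (j + 1) _ (m - d) (-d) hsh' (by omega) hnext hstep (by omega)
        rw [show m - d = m + -d by ring] at this ⊢
        exact this
      · simp only [if_neg hout] at hstep
        rw [if_neg hout, hcc]
        exact ih (j + 1) _ (m + d) d hsh' (by omega) hnext hstep (by omega)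
    · have hj1 : j + 1 = steps := by omega
      rw [if_neg (by rw [hcc, hj1]; exact hend)]
      rw [PySem.List.pyRange_one_eq_nil (by omega), List.foldl_nil]

theorem traceV_eq (H W : Nat) (hW : 1 ≤ W) (d0 dr : Int)
    (hd0 : d0 = 1 ∨ d0 = -1) (c0 r0 steps color : Int)
    (hrow : ∀ k : Int, 0 ≤ k → k < steps → 0 ≤ r0 + dr * k ∧ r0 + dr * k < (H : Int))
    (hend : ¬(0 ≤ r0 + dr * steps ∧ r0 + dr * steps < (H : Int))) :
    ∀ (fuel : Nat) (j : Int) (out : List (List Int)) (m d : Int), Shape out H W →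
      0 ≤ j → j < steps → MInv (W : Int) d0 (c0 + d0 * j) m d →
      (steps - j).toNat ≤ fuel →
      traceV fuel out (r0 + dr * j) m dr d color (H : Int) (W : Int)
        = (PySem.List.pyRange j steps 1).foldl
            (fun o k => pvSetCell o (r0 + dr * k) (pvFold (c0 + d0 * k) (W : Int)) color) out := by
  intro fuel
  induction fuel with
  | zero =>
    intro j out m d hsh hj0 hjs hinv hfuel
    exact absurd hfuel (by omega)
  | succ fuel ih =>
    intro j out m d hsh hj0 hjs hinv hfuel
    have hrowj := hrow j hj0 hjs
    have hw : pvSetCell out (r0 + dr * j) m color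
        = pvSetCell out (r0 + dr * j) (pvFold (c0 + d0 * j) (W : Int)) color :=
      setCell_minv_col out H W hsh d0 _ m d _ color hrowj hinv
    have hsh' : Shape (pvSetCell out (r0 + dr * j) m color) H W := shape_setCell _ _ _ _ _ _ hsh
    rw [PySem.List.pyRange_one_cons hjs, List.foldl_cons, ← hw]
    simp only [traceV]
    rw [if_pos hrowj]
    have hrr : r0 + dr * j + dr = r0 + dr * (j + 1) := by ring
    by_cases hnext : j + 1 < steps
    · have hrowj1 := hrow (j + 1) (by omega) hnext
      rw [if_pos (by rw [hrr]; exact hrowj1)]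
      have hstep := minv_step (W : Int) d0 (c0 + d0 * j) m d (by exact_mod_cast hW) hd0 hinv
      have hp1 : c0 + d0 * j + d0 = c0 + d0 * (j + 1) := by ring
      rw [hp1] at hstep
      by_cases hout : m + d < 0 ∨ (W : Int) ≤ m + d
      · simp only [if_pos hout] at hstep
        rw [if_pos hout, hrr]
        have := ih (j + 1) _ (m - d) (-d) hsh' (by omega) hnext hstep (by omega)
        rw [show m - d = m + -d by ring] at this ⊢
        exact this
      · simp only [if_neg hout] at hstep
        rw [if_neg hout, hrr]
        exact ih (j + 1) _ (m + d) d hsh' (by omega) hnext hstep (by omega)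
    · have hj1 : j + 1 = steps := by omega
      rw [if_neg (by rw [hrr, hj1]; exact hend)]
      rw [PySem.List.pyRange_one_eq_nil (by omega), List.foldl_nil]

theorem minv_init (S : Nat) (r : Int) (hS : 1 ≤ S) (hr : 0 ≤ r ∧ r < (S : Int)) :
    MInv (S : Int) (if r = (S : Int) - 1 then -1 else 1) r r
      (if r = 0 then 1 else if r = (S : Int) - 1 then -1 else 1) := by
  by_cases h1 : S = 1
  · subst h1
    have hr0 : r = 0 := by simp at hr; omega
    subst hr0
    left
    norm_num
  · have hS2 : (2 : Int) ≤ (S : Int) := by exact_mod_cast (by omega : 2 ≤ S)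
    right
    refine ⟨hS2, (pvFold_id _ r hS2 hr).symm, Or.inl ?_⟩
    by_cases hrS : r = (S : Int) - 1
    · have h2 : (if r = 0 then (1:Int) else if r = (S : Int) - 1 then -1 else 1) = -1 := by
        split_ifs <;> omega
      have h3 : (if r = (S : Int) - 1 then (-1:Int) else 1) = -1 := by
        split_ifs ; omega
      rw [h2, h3]
      unfold pvE
      rw [show r + -1 = r - 1 by ring, pvFold_id _ (r - 1) hS2 (by omega),
        pvFold_id _ r hS2 hr]
      ring
    · have h2 : (if r = 0 then (1:Int) else if r = (S : Int) - 1 then -1 else 1) = 1 := by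
        split_ifs <;> omega
      have h3 : (if r = (S : Int) - 1 then (-1:Int) else 1) = 1 := by
        split_ifs ; omega
      rw [h2, h3]
      unfold pvE
      rw [pvFold_id _ (r + 1) hS2 (by omega), pvFold_id _ r hS2 hr]
      ring

-- B's per-source body, with the dimensions as parameters
def altBody (H W : Nat) (out : List (List Int)) (s : Int × Int × Int) : List (List Int) :=
  let r0 := s.1; let c0 := s.2.1; let color := s.2.2
  if (W : Int) ≥ (H : Int) then
    let dc : Int := if c0 = (W : Int) - 1 then -1 else 1
    let d0 : Int := if r0 = (H : Int) - 1 then -1 else 1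
    let steps : Int := if dc = -1 then (W : Int) else (W : Int) - c0
    (PySem.List.pyRange 0 steps 1).foldl
      (fun out k => pvSetCell out (pvFold (r0 + d0 * k) (H : Int)) (c0 + dc * k) color) out
  else
    let dr : Int := if r0 = (H : Int) - 1 then -1 else 1
    let d0 : Int := if c0 = (W : Int) - 1 then -1 else 1
    let steps : Int := if dr = -1 then (H : Int) else (H : Int) - r0
    (PySem.List.pyRange 0 steps 1).foldl
      (fun out k => pvSetCell out (r0 + dr * k) (pvFold (c0 + d0 * k) (W : Int)) color) out

theorem shape_altBody (H W : Nat) (out : List (List Int)) (s : Int × Int × Int)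
    (h : Shape out H W) : Shape (altBody H W out s) H W := by
  unfold altBody
  split_ifs
  · exact shape_foldl _ (fun o k hh => shape_setCell _ _ _ _ _ _ hh) _ _ h
  · exact shape_foldl _ (fun o k hh => shape_setCell _ _ _ _ _ _ hh) _ _ h

theorem traceBD_eq (H W : Nat) (hH : 1 ≤ H) (hW : 1 ≤ W) (out : List (List Int))
    (hsh : Shape out H W) (r c color : Int)
    (hr : 0 ≤ r ∧ r < (H : Int)) (hc : 0 ≤ c ∧ c < (W : Int)) :
    traceBD out r c color = altBody H W out (r, c, color) := by
  have hw0 : (PySem.List.pyGetD out 0 []).length = W :=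
    hsh.2 _ (PySem.List.pyGetD_mem out [] (by unfold PySem.Raise.InRange; rw [hsh.1]; omega))
  unfold traceBD altBody
  simp only [hsh.1, hw0, Int.toNat_natCast]
  by_cases hWH : ((W : Int)) ≥ ((H : Int))
  · rw [if_pos hWH, if_pos hWH]
    by_cases hW1 : W = 1
    · -- W = 1 forces H = 1 and r = c = 0: a single write on both sides
      have hH1 : H = 1 := by
        have : (H : Int) ≤ (W : Int) := hWH
        have : H ≤ W := by exact_mod_cast this
        omega
      subst hW1; subst hH1
      have hr0 : r = 0 := by norm_num at hr; omega
      have hc0 : c = 0 := by norm_num at hc; omega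
      subst hr0; subst hc0
      simp only [Nat.cast_one]
      rw [PySem.List.pyRange_one_cons (by norm_num), PySem.List.pyRange_one_eq_nil (by norm_num)]
      norm_num [traceH, pvFold]
    · -- W ≥ 2: the major directions agree
      have hW2 : (2 : Int) ≤ (W : Int) := by exact_mod_cast (by omega : 2 ≤ W)
      have hdcA : (if c = 0 then (1:Int) else if c = (W : Int) - 1 then -1 else 1)
          = (if c = (W : Int) - 1 then (-1:Int) else 1) := by
        split_ifs <;> omega
      rw [hdcA]
      set dc : Int := if c = (W : Int) - 1 then (-1:Int) else 1 with hdc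
      set d0 : Int := if r = (H : Int) - 1 then (-1:Int) else 1 with hd0
      set steps : Int := if dc = -1 then (W : Int) else (W : Int) - c with hsteps
      have hd0pm : d0 = 1 ∨ d0 = -1 := by rw [hd0]; split_ifs <;> simp
      have hdcpm : dc = 1 ∨ dc = -1 := by rw [hdc]; split_ifs <;> simp
      have hdccase : (dc = -1 ∧ c = (W : Int) - 1) ∨ (dc = 1 ∧ c ≠ (W : Int) - 1) := by
        rw [hdc]; split_ifs with h <;> simp [h]
      have hstepsle : 0 < steps ∧ steps ≤ (W : Int) := by
        rcases hdccase with ⟨h1, h2⟩ | ⟨h1, h2⟩ <;> rw [hsteps, h1] <;> norm_num <;> omega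
      have hcol : ∀ k : Int, 0 ≤ k → k < steps → 0 ≤ c + dc * k ∧ c + dc * k < (W : Int) := by
        intro k hk0 hks
        rcases hdccase with ⟨h1, h2⟩ | ⟨h1, h2⟩ <;> rw [h1] <;> rw [hsteps, h1] at hks <;>
          norm_num at hks ⊢ <;> omega
      have hend : ¬(0 ≤ c + dc * steps ∧ c + dc * steps < (W : Int)) := by
        rcases hdccase with ⟨h1, h2⟩ | ⟨h1, h2⟩ <;> rw [h1] <;> rw [hsteps, h1] <;>
          norm_num ; omega
      have hinv := minv_init H r hH hr
      have := traceH_eq H W hH d0 dc hd0pm r c steps color hcol hend (W + 1) 0 out r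
        (if r = 0 then 1 else if r = (H : Int) - 1 then -1 else 1) hsh le_rfl hstepsle.1
        (by rw [← hd0]; simpa using hinv) (by omega)
      simpa using this
  · rw [if_neg hWH, if_neg hWH]
    have hH2 : (2 : Int) ≤ (H : Int) := by
      have : (W : Int) < (H : Int) := by omega
      have : W < H := by exact_mod_cast this
      have : 2 ≤ H := by omega
      exact_mod_cast this
    have hdrA : (if r = 0 then (1:Int) else if r = (H : Int) - 1 then -1 else 1)
        = (if r = (H : Int) - 1 then (-1:Int) else 1) := by
      split_ifs <;> omega
    rw [hdrA]
    set dr : Int := if r = (H : Int) - 1 then (-1:Int) else 1 with hdr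
    set d0 : Int := if c = (W : Int) - 1 then (-1:Int) else 1 with hd0
    set steps : Int := if dr = -1 then (H : Int) else (H : Int) - r with hsteps
    have hd0pm : d0 = 1 ∨ d0 = -1 := by rw [hd0]; split_ifs <;> simp
    have hdrcase : (dr = -1 ∧ r = (H : Int) - 1) ∨ (dr = 1 ∧ r ≠ (H : Int) - 1) := by
      rw [hdr]; split_ifs with h <;> simp [h]
    have hstepsle : 0 < steps ∧ steps ≤ (H : Int) := by
      rcases hdrcase with ⟨h1, h2⟩ | ⟨h1, h2⟩ <;> rw [hsteps, h1] <;> norm_num <;> omega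
    have hrow : ∀ k : Int, 0 ≤ k → k < steps → 0 ≤ r + dr * k ∧ r + dr * k < (H : Int) := by
      intro k hk0 hks
      rcases hdrcase with ⟨h1, h2⟩ | ⟨h1, h2⟩ <;> rw [h1] <;> rw [hsteps, h1] at hks <;>
        norm_num at hks ⊢ <;> omega
    have hend : ¬(0 ≤ r + dr * steps ∧ r + dr * steps < (H : Int)) := by
      rcases hdrcase with ⟨h1, h2⟩ | ⟨h1, h2⟩ <;> rw [h1] <;> rw [hsteps, h1] <;>
        norm_num ; omega
    have hinv := minv_init W c hW hc
    have := traceV_eq H W hW d0 dr hd0pm c r steps color hrow hend (H + 1) 0 out c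
      (if c = 0 then 1 else if c = (W : Int) - 1 then -1 else 1) hsh le_rfl hstepsle.1
      (by rw [← hd0]; simpa using hinv) (by omega)
    simpa using this

theorem sources_bounds (grid : List (List Int)) (W : Nat)
    (hrect : ∀ row ∈ grid, row.length = W) (bg : Int) :
    ∀ s ∈ pvSources grid bg,
      (0 ≤ s.1 ∧ s.1 < (grid.length : Int)) ∧ (0 ≤ s.2.1 ∧ s.2.1 < (W : Int)) := by
  intro s hs
  unfold pvSources at hs
  rw [List.mem_flatMap] at hs
  obtain ⟨p, hp, hs⟩ := hs
  rw [PySem.List.mem_enumerate_iff] at hp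
  obtain ⟨k, hk, rfl⟩ := hp
  rw [List.mem_map] at hs
  obtain ⟨q, hq, rfl⟩ := hs
  rw [List.mem_filter] at hq
  obtain ⟨hq, _⟩ := hq
  rw [PySem.List.mem_enumerate_iff] at hq
  obtain ⟨j, hj, rfl⟩ := hq
  have hjW : j < W := by rw [← hrect _ (List.getElem_mem hk)]; exact hj
  constructor
  · constructor
    · simp
    · simp only [zero_add]
      exact_mod_cast hk
  · constructor
    · simp
    · simp only [zero_add]
      exact_mod_cast hjW

theorem fold_sources (H W : Nat) (hH : 1 ≤ H) (hW : 1 ≤ W)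
    (srcs : List (Int × Int × Int))
    (hb : ∀ s ∈ srcs, (0 ≤ s.1 ∧ s.1 < (H : Int)) ∧ (0 ≤ s.2.1 ∧ s.2.1 < (W : Int))) :
    ∀ out, Shape out H W →
      srcs.foldl (fun o s => traceBD o s.1 s.2.1 s.2.2) out = srcs.foldl (altBody H W) out := by
  induction srcs with
  | nil => intro out _; rfl
  | cons s t ih =>
    intro out hsh
    obtain ⟨hs1, hs2⟩ := hb s (List.mem_cons_self ..)
    rw [List.foldl_cons, List.foldl_cons,
      traceBD_eq H W hH hW out hsh s.1 s.2.1 s.2.2 hs1 hs2]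
    exact ih (fun x hx => hb x (List.mem_cons_of_mem _ hx)) _ (shape_altBody H W out s hsh)

theorem initA_eq (grid : List (List Int)) (W : Nat) (bg : Int)
    (hrect : ∀ row ∈ grid, row.length = W) :
    grid.map (fun row => row.map (fun _ => bg))
      = List.replicate grid.length (List.replicate W bg) := by
  rw [List.eq_replicate_iff]
  refine ⟨by simp, ?_⟩
  intro b hb
  rw [List.mem_map] at hb
  obtain ⟨row, hrow, rfl⟩ := hb
  rw [List.map_const', hrect _ hrow]

theorem initB_eq (grid : List (List Int)) (W : Nat) (bg : Int) :
    (PySem.List.pyRange 0 (grid.length : Int) 1).map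
        (fun _ => PySem.List.pyRepeat [bg] (W : Int))
      = List.replicate grid.length (List.replicate W bg) := by
  rw [List.eq_replicate_iff]
  refine ⟨by simp [PySem.List.length_pyRange_one], ?_⟩
  intro b hb
  rw [List.mem_map] at hb
  obtain ⟨_, _, rfl⟩ := hb
  rw [PySem.List.pyRepeat_singleton, Int.toNat_natCast]

theorem shape_replicate (H W : Nat) (bg : Int) :
    Shape (List.replicate H (List.replicate W bg)) H W := by
  refine ⟨by simp, ?_⟩
  intro row hrow
  rw [List.eq_of_mem_replicate hrow]
  simp

theorem set_foldl_const (c : Int) (t : List Int) (h : ∀ x ∈ t, x = c) :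
    t.foldl PySem.Set.add [c] = [c] := by
  induction t with
  | nil => rfl
  | cons x r ih =>
    have hx : x = c := h x (List.mem_cons_self ..)
    subst hx
    rw [List.foldl_cons, show PySem.Set.add [x] x = [x] from by
      simp [PySem.Set.add, PySem.Set.contains]]
    exact ih (fun y hy => h y (List.mem_cons_of_mem _ hy))

theorem sources_nil_const (grid : List (List Int)) (hne : grid.flatten ≠ [])
    (hall : ∀ x ∈ grid.flatten, x = grid.flatten.headD 0) :
    pvSources grid (pvBackground grid) = [] := by
  have hflat : grid.flatMap id = grid.flatten := by simp
  set c := grid.flatten.headD 0 with hc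
  obtain ⟨x, t, hxt⟩ : ∃ x t, grid.flatten = x :: t := by
    cases hflatten : grid.flatten with
    | nil => exact absurd hflatten hne
    | cons x t => exact ⟨x, t, rfl⟩
  have hxc : c = x := by rw [hc, hxt]; rfl
  have hset : PySem.Set.ofList grid.flatten = [c] := by
    rw [hxt, show PySem.Set.ofList (x :: t) = t.foldl PySem.Set.add (PySem.Set.add [] x) from rfl]
    rw [show PySem.Set.add ([] : List Int) x = [x] from rfl, ← hxc]
    exact set_foldl_const c t (fun y hy => hall y (by rw [hxt]; exact List.mem_cons_of_mem _ hy))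
  have hbg : pvBackground grid = c := by
    unfold pvBackground
    rw [hflat]
    cases hmax : PySem.List.max? (PySem.Dict.counter grid.flatten).items (fun p => p.2) with
    | none =>
      rw [PySem.List.max?_eq_none_iff] at hmax
      rw [PySem.Dict.items_counter, hset] at hmax
      simp at hmax
    | some m =>
      have hmem := PySem.List.max?_mem hmax
      rw [PySem.Dict.items_counter, hset] at hmem
      simp at hmem
      simp [hmem]
  unfold pvSources
  rw [List.flatMap_eq_nil_iff]
  intro p hp
  rw [PySem.List.mem_enumerate_iff] at hp
  obtain ⟨k, hk, rfl⟩ := hp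
  rw [List.map_eq_nil_iff, List.filter_eq_nil_iff]
  intro q hq
  rw [PySem.List.mem_enumerate_iff] at hq
  obtain ⟨j, hj, rfl⟩ := hq
  have hmem : grid[k][j] ∈ grid.flatten :=
    List.mem_flatten.mpr ⟨grid[k], List.getElem_mem hk, List.getElem_mem hj⟩
  have := hall _ hmem
  simp [hbg, this]

-- ===== VERDICT (by name: the statement is the Claim_ definition above) =====
theorem transform_spec : Claim_equal_transform := by
  intro grid _ hpre
  show transform grid = transform_alt grid
  unfold transform transform_alt
  by_cases hsrc : pvSources grid (pvBackground grid) = []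
  · simp [hsrc]
  · rcases hpre with ⟨hne, hw0, hrect⟩ | ⟨hfne, hall⟩
    · simp only [if_neg hsrc]
      have hH : 1 ≤ grid.length := by
        cases grid
        · exact absurd rfl hne
        · rw [List.length_cons]; omega
      have hW : 1 ≤ (grid.headD []).length := by omega
      have hg0 : PySem.List.pyGetD grid 0 [] = grid.headD [] := by
        cases grid
        · exact absurd rfl hne
        · rw [PySem.List.pyGetD_zero]; rfl
      rw [hg0]
      rw [initA_eq grid (grid.headD []).length (pvBackground grid) hrect,
        initB_eq grid (grid.headD []).length (pvBackground grid)]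
      have hb := sources_bounds grid (grid.headD []).length hrect (pvBackground grid)
      exact fold_sources grid.length (grid.headD []).length hH hW _
        (fun s hs => hb s hs) _
        (shape_replicate grid.length (grid.headD []).length (pvBackground grid))
    · exact absurd (sources_nil_const grid hfne hall) hsrc
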